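-- pv_equiv track=rewrite | github.com/vickianand/pascal-to-mips-compiler | scripts/tree_script.py | symbol_type
-- ===== SOURCE A (Python) =====
-- def symbol_type(s) :
-- 	flag = 1
-- 	for c in s:
-- 		if c >= 'a' and c <= 'z' :
-- 			flag = 0
-- 		else:
-- 			if not((c >= 'A' and c<= 'Z') or c == '_'):
-- 				flag = 2
-- 				break
--
-- 	if flag == 1:
-- 		return "terminal"
-- 	elif flag == 0:
-- 		return "non_terminal"
-- 	else:
-- 		# print "some kachra given to symbol_type() function!"
-- 		return "kachra"
-- ===== SOURCE B (Python) =====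
-- def symbol_type(s):
--     if all('a' <= c <= 'z' or 'A' <= c <= 'Z' or c == '_' for c in s):
--         return "non_terminal" if any('a' <= c <= 'z' for c in s) else "terminal"
--     return "kachra"
-- ===== Notes on version B (the rewrite author's own statement) =====
-- stated objective: idiomatic
-- what changed: Replaces the flag-and-break state loop by two declarative queries: an all() membership check over the valid character set decides the invalid case, then an any() lowercase check decides between the two remaining results.
import Mathlib
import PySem

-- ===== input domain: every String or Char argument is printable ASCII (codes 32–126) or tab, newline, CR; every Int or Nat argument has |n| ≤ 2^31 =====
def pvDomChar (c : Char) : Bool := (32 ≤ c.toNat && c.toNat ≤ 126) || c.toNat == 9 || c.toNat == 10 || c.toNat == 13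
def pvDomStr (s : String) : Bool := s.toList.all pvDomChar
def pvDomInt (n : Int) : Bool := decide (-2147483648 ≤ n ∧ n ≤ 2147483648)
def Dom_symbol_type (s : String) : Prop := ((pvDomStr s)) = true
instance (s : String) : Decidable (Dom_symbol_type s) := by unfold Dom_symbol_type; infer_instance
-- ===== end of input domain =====

-- B replaces A's flag-and-break state loop by two declarative queries (all-valid, then any-lowercase); idiomatic, same cost.

-- ===== PORT A =====
-- A's for-loop with break, transcribed as structural recursion carrying the flag.
def symbolTypeLoop : List Char → Int → Int
  | [], flag => flag
  | c :: cs, flag =>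
    if 'a' ≤ c ∧ c ≤ 'z' then symbolTypeLoop cs 0
    else if ¬ (('A' ≤ c ∧ c ≤ 'Z') ∨ c = '_') then 2
    else symbolTypeLoop cs flag

def symbol_type (s : String) : String :=
  let flag := symbolTypeLoop s.toList 1
  if flag = 1 then "terminal"
  else if flag = 0 then "non_terminal"
  else "kachra"

-- ===== PORT B =====
def symbol_type_alt (s : String) : String :=
  if s.toList.all (fun c => (decide ('a' ≤ c) && decide (c ≤ 'z')) || (decide ('A' ≤ c) && decide (c ≤ 'Z')) || c == '_')
  then if s.toList.any (fun c => decide ('a' ≤ c) && decide (c ≤ 'z')) then "non_terminal" else "terminal"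
  else "kachra"

-- ===== PRECONDITION & SPEC =====
def Spec_symbol_type (s : String) (out : String) : Prop := out = symbol_type_alt s
instance (s : String) (out : String) : Decidable (Spec_symbol_type s out) := by unfold Spec_symbol_type; infer_instance

-- ===== CLAIM (what is proved, stated in full; the proofs are below) =====
def Claim_equal_symbol_type : Prop := ∀ (s : String), Dom_symbol_type s → Spec_symbol_type s (symbol_type s)

-- ===== LEMMAS AND PROOFS =====
theorem symbolTypeLoop_char (l : List Char) (flag : Int) (h : flag = 0 ∨ flag = 1) :
    symbolTypeLoop l flag =
      if l.all (fun c => (decide ('a' ≤ c) && decide (c ≤ 'z')) || (decide ('A' ≤ c) && decide (c ≤ 'Z')) || c == '_')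
      then if l.any (fun c => decide ('a' ≤ c) && decide (c ≤ 'z')) then 0 else flag
      else 2 := by
  induction l generalizing flag with
  | nil => simp [symbolTypeLoop]
  | cons c cs ih =>
    by_cases hlo : 'a' ≤ c ∧ c ≤ 'z'
    · have hv : ((decide ('a' ≤ c) && decide (c ≤ 'z')) || (decide ('A' ≤ c) && decide (c ≤ 'Z')) || c == '_') = true := by
        simp [hlo.1, hlo.2]
      simp only [symbolTypeLoop, if_pos hlo, List.all_cons, List.any_cons, hv, Bool.true_and]
      rw [ih 0 (Or.inl rfl)]
      simp [hlo.1, hlo.2]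
    · by_cases hval : ('A' ≤ c ∧ c ≤ 'Z') ∨ c = '_'
      · have hlo' : (decide ('a' ≤ c) && decide (c ≤ 'z')) = false := by
          rcases Decidable.not_and_iff_not_or_not.mp hlo with h1 | h1 <;> simp [h1]
        have hv : ((decide ('A' ≤ c) && decide (c ≤ 'Z')) || c == '_') = true := by
          rcases hval with ⟨h1, h2⟩ | h1
          · simp [h1, h2]
          · simp [h1]
        simp only [symbolTypeLoop, if_neg hlo, if_neg (not_not_intro hval), List.all_cons,
          List.any_cons, hlo', Bool.false_or, hv, Bool.true_and]
        exact ih flag h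
      · have hv : ((decide ('a' ≤ c) && decide (c ≤ 'z')) || (decide ('A' ≤ c) && decide (c ≤ 'Z')) || c == '_') = false := by
          have hlo' : (decide ('a' ≤ c) && decide (c ≤ 'z')) = false := by
            rcases Decidable.not_and_iff_not_or_not.mp hlo with h1 | h1 <;> simp [h1]
          have h1 : ¬ ('A' ≤ c ∧ c ≤ 'Z') := fun hc => hval (Or.inl hc)
          have h2 : ¬ c = '_' := fun hc => hval (Or.inr hc)
          rcases Decidable.not_and_iff_not_or_not.mp h1 with h3 | h3 <;> simp [hlo', h3, h2]
        simp only [symbolTypeLoop, if_neg hlo, if_pos hval, List.all_cons, hv, Bool.false_and]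
        simp

-- ===== VERDICT (by name: the statement is the Claim_ definition above) =====
theorem symbol_type_spec : Claim_equal_symbol_type := by
  intro s _hd
  unfold Spec_symbol_type symbol_type symbol_type_alt
  rw [symbolTypeLoop_char s.toList 1 (Or.inr rfl)]
  split_ifs <;> simp_all
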